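-- pv_equiv track=rewrite | github.com/r-zemblys/EM-event-detection-evaluation | misc/utils.py | aggr_events
-- ===== SOURCE A (Python) =====
-- import itertools
--
-- def aggr_events(events_raw):
--     """Aggregates event vector to the list of compact event vectors.
--     Parameters:
--         events_raw  --  vector of raw events
--     Returns:
--         events_aggr --  list of compact event vectors ([onset, offset, event])
--     """
--
--     events_aggr = []
--     s = 0
--     for bit, group in itertools.groupby(events_raw):
--         event_length = len(list(group))
--         e = s + event_length
--         events_aggr.append([s, e, bit])
--         s = e
--     return events_aggr
-- ===== SOURCE B (Python) =====
-- def aggr_events(events_raw):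
--     """Aggregates event vector to the list of compact event vectors.
--
--     Divide and conquer: aggregate each half of the index range recursively,
--     then merge, joining the two boundary segments when they carry the same event.
--     """
--     def merge(left, right):
--         l = left[-1]
--         r = right[0]
--         if l[2] == r[2]:
--             return left[:-1] + [[l[0], r[1], l[2]]] + right[1:]
--         return left + right
--
--     def rec(lo, hi):
--         if hi - lo <= 1:
--             return [] if hi <= lo else [[lo, hi, events_raw[lo]]]
--         mid = (lo + hi) // 2
--         return merge(rec(lo, mid), rec(mid, hi))
--
--     return rec(0, len(events_raw))
-- ===== Notes on version B (the rewrite author's own statement) =====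
-- stated objective: alternative
-- what changed: Replaces groupby's left-to-right run accumulation by a divide-and-conquer recursion over the index range: each half is aggregated recursively and the halves are merged, joining the two boundary segments when they carry the same event.
import Mathlib
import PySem

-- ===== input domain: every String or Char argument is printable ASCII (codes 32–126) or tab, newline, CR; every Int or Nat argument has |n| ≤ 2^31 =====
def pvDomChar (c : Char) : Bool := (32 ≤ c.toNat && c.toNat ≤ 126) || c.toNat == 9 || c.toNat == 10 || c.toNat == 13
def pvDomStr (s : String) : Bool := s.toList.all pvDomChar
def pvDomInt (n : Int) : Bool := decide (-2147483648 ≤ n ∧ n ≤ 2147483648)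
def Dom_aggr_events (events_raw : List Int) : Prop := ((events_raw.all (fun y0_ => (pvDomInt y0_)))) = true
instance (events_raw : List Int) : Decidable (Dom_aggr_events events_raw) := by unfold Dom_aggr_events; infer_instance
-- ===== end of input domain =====

-- B replaces groupby's left-to-right run accumulation by a divide-and-conquer
-- recursion over the index range (aggregate each half, then merge at the boundary).

-- ===== PORT A =====
-- itertools.groupby yields one maximal run of equal elements per iteration:
-- after the head x, the rest of the run is takeWhile (· == x), the remainder dropWhile (· == x).
def aggr_events_go (xs : List Int) (s : Int) : List (List Int) :=
  match xs with
  | [] => []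
  | x :: rest =>
    let run := rest.takeWhile (fun y => y == x)
    let e := s + 1 + run.length
    [s, e, x] :: aggr_events_go (rest.dropWhile (fun y => y == x)) e
termination_by xs.length
decreasing_by
  simp only [List.length_cons]
  have := List.length_dropWhile_le (p := fun y => y == x) (l := rest)
  omega

def aggr_events (events_raw : List Int) : List (List Int) :=
  aggr_events_go events_raw 0

-- ===== PORT B =====
-- merge(left, right) of Source B; left and right are always nonempty where it is called,
-- so the getLastD/headD/getD defaults are never used: left[-1] → getLastD, right[0] → headD,
-- left[:-1] → dropLast, right[1:] → drop 1 (all exact on nonempty lists of 3-element segments).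
def aggr_merge (left right : List (List Int)) : List (List Int) :=
  let l := left.getLastD []
  let r := right.headD []
  if l.getD 2 0 == r.getD 2 0 then
    left.dropLast ++ ([l.getD 0 0, r.getD 1 0, l.getD 2 0] :: right.drop 1)
  else left ++ right

-- rec(lo, hi) of Source B; events_raw[lo] is always in range (lo < hi ≤ len), ported with pyGetD.
def aggr_rec (xs : List Int) (lo hi : Nat) : List (List Int) :=
  if hi ≤ lo then []
  else if hi - lo = 1 then [[(lo : Int), (hi : Int), PySem.List.pyGetD xs (lo : Int) 0]]
  else aggr_merge (aggr_rec xs lo ((lo + hi) / 2)) (aggr_rec xs ((lo + hi) / 2) hi)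
termination_by hi - lo
decreasing_by all_goals omega

def aggr_events_alt (events_raw : List Int) : List (List Int) :=
  aggr_rec events_raw 0 events_raw.length

-- ===== PRECONDITION & SPEC =====
def Spec_aggr_events (events_raw : List Int) (out : List (List Int)) : Prop := out = aggr_events_alt events_raw
instance (events_raw : List Int) (out : List (List Int)) : Decidable (Spec_aggr_events events_raw out) := by unfold Spec_aggr_events; infer_instance

-- ===== CLAIM (what is proved, stated in full; the proofs are below) =====
def Claim_equal_aggr_events : Prop := ∀ (events_raw : List Int), Dom_aggr_events events_raw → Spec_aggr_events events_raw (aggr_events events_raw)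

-- ===== LEMMAS AND PROOFS =====

theorem go_nil (s : Int) : aggr_events_go [] s = [] := by
  rw [aggr_events_go.eq_def]

theorem go_cons (x : Int) (rest : List Int) (s : Int) :
    aggr_events_go (x :: rest) s
      = [s, s + 1 + ((rest.takeWhile (fun y => y == x)).length : Int), x] ::
        aggr_events_go (rest.dropWhile (fun y => y == x))
          (s + 1 + ((rest.takeWhile (fun y => y == x)).length : Int)) := by
  rw [aggr_events_go.eq_def]

theorem go_ne_nil (xs : List Int) (s : Int) (h : xs ≠ []) : aggr_events_go xs s ≠ [] := by
  cases xs with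
  | nil => exact absurd rfl h
  | cons x rest => rw [go_cons]; simp

theorem getLast?_cons_ne_nil {α : Type} (a : α) (m : List α) (h : m ≠ []) :
    (a :: m).getLast? = m.getLast? := by
  cases m with
  | nil => exact absurd rfl h
  | cons b t => simp [List.getLast?_cons_cons]

theorem merge_cons (seg : List Int) (m n : List (List Int)) (hm : m ≠ []) :
    aggr_merge (seg :: m) n = seg :: aggr_merge m n := by
  unfold aggr_merge
  simp only [List.getLastD_eq_getLast?, getLast?_cons_ne_nil _ _ hm,
    List.dropLast_cons_of_ne_nil hm]
  split <;> simp

theorem tw_dw_length (p : Int → Bool) (l : List Int) :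
    (l.takeWhile p).length + (l.dropWhile p).length = l.length := by
  rw [← List.length_append, List.takeWhile_append_dropWhile]

theorem dropLast_one {α : Type} (a : α) : ([a] : List α).dropLast = [] := rfl

theorem go_append : ∀ (n : Nat) (as bs : List Int) (s : Int), as.length ≤ n → as ≠ [] → bs ≠ [] →
    aggr_events_go (as ++ bs) s
      = aggr_merge (aggr_events_go as s) (aggr_events_go bs (s + (as.length : Int))) := by
  intro n
  induction n with
  | zero =>
    intro as bs s hlen hne
    cases as with
    | nil => exact absurd rfl hne
    | cons a t => simp at hlen
  | succ n ih =>
    intro as bs s hlen hne hbs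
    cases as with
    | nil => exact absurd rfl hne
    | cons x rest =>
      have hsum := tw_dw_length (fun y => y == x) rest
      by_cases hd : rest.dropWhile (fun y => y == x) = []
      · -- as is a single run of x
        have htw : rest.takeWhile (fun y => y == x) = rest := by
          have := List.takeWhile_append_dropWhile (p := fun y => y == x) (l := rest)
          rw [hd, List.append_nil] at this
          exact this
        cases bs with
        | nil => exact absurd rfl hbs
        | cons y ys =>
          rw [show (x :: rest) ++ (y :: ys) = x :: (rest ++ (y :: ys)) from rfl]
          rw [go_cons, go_cons, htw, hd, go_nil]
          rw [List.takeWhile_append, List.dropWhile_append]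
          rw [htw, if_pos rfl, hd]
          simp only [List.isEmpty_nil, if_pos]
          by_cases hyx : (y == x) = true
          · have hyx' : y = x := by simpa using hyx
            subst hyx'
            rw [List.takeWhile_cons, List.dropWhile_cons]
            simp only [beq_self_eq_true, if_pos]
            rw [go_cons]
            unfold aggr_merge
            simp only [List.getLastD_cons, List.getLastD_nil, List.headD_cons,
              List.getD_cons_succ, List.getD_cons_zero, dropLast_one,
              List.nil_append, List.drop_succ_cons, List.drop_zero]
            rw [if_pos (beq_self_eq_true _)]
            congr 1
            · simp only [List.cons.injEq, and_true, true_and]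
              push_cast [List.length_append, List.length_cons]
              ring
            · congr 1
              push_cast [List.length_append, List.length_cons]
              ring
          · have hyx0 : (y == x) = false := by simpa using hyx
            rw [List.takeWhile_cons, List.dropWhile_cons]
            simp only [hyx0, Bool.false_eq_true, if_false]
            rw [go_cons, go_cons]
            unfold aggr_merge
            have hxy0 : ((x == y) : Bool) = false := by
              simp only [beq_eq_false_iff_ne] at hyx0 ⊢
              exact fun h => hyx0 h.symm
            simp only [List.getLastD_cons, List.getLastD_nil, List.headD_cons,
              List.getD_cons_succ, List.getD_cons_zero]
            rw [if_neg (by simp [hxy0])]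
            simp only [List.cons_append, List.nil_append, List.append_nil]
            rw [show s + (((x :: rest).length : Nat) : Int) = s + 1 + ((rest.length : Nat) : Int) from by
              push_cast [List.length_cons]; ring]
      · -- the first run ends inside rest
        have hlt : (rest.takeWhile (fun y => y == x)).length ≠ rest.length := by
          have : 0 < (rest.dropWhile (fun y => y == x)).length := List.length_pos_of_ne_nil hd
          omega
        rw [show (x :: rest) ++ bs = x :: (rest ++ bs) from rfl]
        rw [go_cons, go_cons]
        rw [List.takeWhile_append, List.dropWhile_append]
        rw [if_neg hlt]
        rw [if_neg (by simpa [List.isEmpty_iff] using hd)]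
        have hdlen : (rest.dropWhile (fun y => y == x)).length ≤ n := by
          simp only [List.length_cons] at hlen
          have := List.length_dropWhile_le (p := fun y => y == x) (l := rest)
          omega
        rw [ih (rest.dropWhile (fun y => y == x)) bs
              (s + 1 + ((rest.takeWhile (fun y => y == x)).length : Int)) hdlen hd hbs]
        rw [merge_cons _ _ _ (go_ne_nil _ _ hd)]
        rw [show (s + 1 + ((rest.takeWhile (fun y => y == x)).length : Int))
              + ((rest.dropWhile (fun y => y == x)).length : Int)
              = s + (((x :: rest).length : Nat) : Int) from by
            push_cast [List.length_cons]; omega]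

theorem rec_eq_go (xs : List Int) : ∀ (n lo hi : Nat), hi - lo ≤ n → hi ≤ xs.length →
    aggr_rec xs lo hi = aggr_events_go ((xs.drop lo).take (hi - lo)) (lo : Int) := by
  intro n
  induction n with
  | zero =>
    intro lo hi hn hhi
    rw [aggr_rec.eq_def, if_pos (by omega), show hi - lo = 0 from by omega,
      List.take_zero, go_nil]
  | succ n ih =>
    intro lo hi hn hhi
    by_cases h1 : hi ≤ lo
    · rw [aggr_rec.eq_def, if_pos h1, show hi - lo = 0 from by omega,
        List.take_zero, go_nil]
    · by_cases h2 : hi - lo = 1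
      · have hlo : lo < xs.length := by omega
        rw [aggr_rec.eq_def, if_neg h1, if_pos h2, h2]
        rw [List.drop_eq_getElem_cons hlo]
        rw [show (1 : Nat) = 0 + 1 from rfl, List.take_succ_cons, List.take_zero]
        rw [go_cons]
        simp only [List.takeWhile_nil, List.dropWhile_nil, go_nil, List.length_nil]
        rw [PySem.List.pyGetD_natCast, List.getD_eq_getElem xs 0 hlo]
        rw [show ((hi : Nat) : Int) = (lo : Int) + 1 + ((0 : Nat) : Int) from by push_cast; omega]
      · have hmid1 : lo < (lo + hi) / 2 := by omega
        have hmid2 : (lo + hi) / 2 < hi := by omega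
        rw [aggr_rec.eq_def, if_neg h1, if_neg h2]
        rw [ih lo ((lo + hi) / 2) (by omega) (by omega)]
        rw [ih ((lo + hi) / 2) hi (by omega) hhi]
        have hlenL : ((xs.drop lo).take ((lo + hi) / 2 - lo)).length = (lo + hi) / 2 - lo := by
          simp only [List.length_take, List.length_drop]
          omega
        have hL : (xs.drop lo).take ((lo + hi) / 2 - lo) ≠ [] := by
          apply List.ne_nil_of_length_pos
          rw [hlenL]
          omega
        have hR : (xs.drop ((lo + hi) / 2)).take (hi - (lo + hi) / 2) ≠ [] := by
          apply List.ne_nil_of_length_pos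
          simp only [List.length_take, List.length_drop]
          omega
        have hsplit : (xs.drop lo).take (hi - lo)
            = (xs.drop lo).take ((lo + hi) / 2 - lo) ++ (xs.drop ((lo + hi) / 2)).take (hi - (lo + hi) / 2) := by
          rw [show hi - lo = ((lo + hi) / 2 - lo) + (hi - (lo + hi) / 2) from by omega,
            List.take_add]
          congr 1
          rw [List.drop_drop, show lo + ((lo + hi) / 2 - lo) = (lo + hi) / 2 from by omega]
        rw [hsplit, go_append ((xs.drop lo).take ((lo + hi) / 2 - lo)).length _ _ _ le_rfl hL hR]
        rw [hlenL]
        rw [show (lo : Int) + (((lo + hi) / 2 - lo : Nat) : Int) = (((lo + hi) / 2 : Nat) : Int) from by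
          push_cast; omega]

-- ===== VERDICT (by name: the statement is the Claim_ definition above) =====
theorem aggr_events_spec : Claim_equal_aggr_events := by
  intro xs _
  unfold Spec_aggr_events aggr_events aggr_events_alt
  rw [rec_eq_go xs xs.length 0 xs.length (by omega) le_rfl]
  simp
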